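-- pv_equiv track=rewrite | github.com/Thigasprogrammer/POO | Desafio2StringPythonv.py | encontrar_palavras
-- ===== SOURCE A (Python) =====
-- def encontrar_palavras(texto):
--     palavras = []
--     palavra = ''
--     for caractere in texto:
--         if caractere.isalpha() or caractere.isdigit():
--             palavra += caractere
--         else:
--             if len(palavra) >= 4 and not palavra.isdigit():
--                 palavras.append(palavra.lower())  # Adiciona em minúsculas
--             palavra = ''
--
--     # Verifica a última palavra (caso o texto não termine com espaço)
--     if len(palavra) >= 4 and not palavra.isdigit():
--         palavras.append(palavra.lower())
--
--     return palavras
-- ===== SOURCE B (Python) =====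
-- def encontrar_palavras(texto):
--     # map every non-word character to a space, then tokenize with str.split()
--     sep = ''.join(c if (c.isalpha() or c.isdigit()) else ' ' for c in texto)
--     return [p.lower() for p in sep.split() if len(p) >= 4 and not p.isdigit()]
-- ===== Notes on version B (the rewrite author's own statement) =====
-- stated objective: idiomatic
-- what changed: Replaces the manual character-by-character accumulator loop with a map-to-space pass followed by str.split() tokenization and a filtering comprehension.
import Mathlib
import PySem

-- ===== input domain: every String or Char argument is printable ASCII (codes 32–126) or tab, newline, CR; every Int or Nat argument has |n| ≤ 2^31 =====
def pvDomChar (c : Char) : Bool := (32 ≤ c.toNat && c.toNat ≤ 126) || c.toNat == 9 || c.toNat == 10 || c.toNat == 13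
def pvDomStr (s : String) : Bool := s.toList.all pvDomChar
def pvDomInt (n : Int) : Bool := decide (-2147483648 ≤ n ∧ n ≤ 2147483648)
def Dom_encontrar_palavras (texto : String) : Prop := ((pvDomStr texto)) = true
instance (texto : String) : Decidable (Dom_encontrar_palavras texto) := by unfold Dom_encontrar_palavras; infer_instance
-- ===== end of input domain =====

-- B replaces A's character-by-character accumulator loop by a map-to-space pass, str.split() tokenization and a filtering comprehension (idiomatic; same cost).

-- ===== PORT A =====
-- the body of A's for-loop, acting on the state (palavras, palavra); the running word is its list of characters
def encontrar_palavras_step (st : List String × List Char) (caractere : Char) : List String × List Char :=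
  if PySem.Chars.isalpha caractere || PySem.Chars.isdigit caractere then
    (st.1, st.2 ++ [caractere])
  else
    if decide (4 ≤ st.2.length) && !PySem.Chars.strIsdigit st.2 then
      (st.1 ++ [String.ofList (PySem.Chars.lower st.2)], [])
    else (st.1, [])

def encontrar_palavras (texto : String) : List String :=
  let r := texto.toList.foldl encontrar_palavras_step ([], [])
  if decide (4 ≤ r.2.length) && !PySem.Chars.strIsdigit r.2 then
    r.1 ++ [String.ofList (PySem.Chars.lower r.2)]
  else r.1

-- ===== PORT B =====
def encontrar_palavras_alt (texto : String) : List String :=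
  let sep := String.ofList (texto.toList.map
    (fun c => if PySem.Chars.isalpha c || PySem.Chars.isdigit c then c else ' '))
  ((PySem.Str.split₀ sep).filter
      (fun p => decide (4 ≤ PySem.Str.len p) && !PySem.Str.strIsdigit p)).map PySem.Str.lower

-- ===== PRECONDITION & SPEC =====
def Spec_encontrar_palavras (texto : String) (out : List String) : Prop := out = encontrar_palavras_alt texto
instance (texto : String) (out : List String) : Decidable (Spec_encontrar_palavras texto out) := by unfold Spec_encontrar_palavras; infer_instance

-- ===== CLAIM (what is proved, stated in full; the proofs are below) =====
def Claim_equal_encontrar_palavras : Prop := ∀ (texto : String), Dom_encontrar_palavras texto → Spec_encontrar_palavras texto (encontrar_palavras texto)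

-- ===== LEMMAS AND PROOFS =====

def pvPred (c : Char) : Bool := PySem.Chars.isalpha c || PySem.Chars.isdigit c
def pvGood (w : List Char) : Bool := decide (4 ≤ w.length) && !PySem.Chars.strIsdigit w
def pvFin (w : List Char) : String := String.ofList (PySem.Chars.lower w)
def pvToks : List Char → List Char → List (List Char)
  | [], cur => if cur.isEmpty then [] else [cur]
  | c :: rest, cur =>
    if pvPred c then pvToks rest (cur ++ [c])
    else (if cur.isEmpty then [] else [cur]) ++ pvToks rest []

lemma pvGood_nil : pvGood [] = false := by simp [pvGood]

lemma pvStep_pred (st : List String × List Char) (c : Char) (h : pvPred c = true) :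
    encontrar_palavras_step st c = (st.1, st.2 ++ [c]) := by
  simp only [pvPred] at h
  simp [encontrar_palavras_step, h]

lemma pvStep_notpred (st : List String × List Char) (c : Char) (h : pvPred c = false) :
    encontrar_palavras_step st c = (if pvGood st.2 then st.1 ++ [pvFin st.2] else st.1, []) := by
  simp only [pvPred, Bool.or_eq_false_iff] at h
  simp only [encontrar_palavras_step, h.1, h.2, Bool.or_self, Bool.false_eq_true, if_false, pvGood, pvFin]
  split_ifs <;> simp_all

lemma pvA (cs : List Char) (pal : List String) (w : List Char) :
    (if pvGood (cs.foldl encontrar_palavras_step (pal, w)).2 then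
        (cs.foldl encontrar_palavras_step (pal, w)).1 ++ [pvFin (cs.foldl encontrar_palavras_step (pal, w)).2]
      else (cs.foldl encontrar_palavras_step (pal, w)).1)
    = pal ++ ((pvToks cs w).filter pvGood).map pvFin := by
  induction cs generalizing pal w with
  | nil =>
    simp only [List.foldl_nil, pvToks]
    by_cases hw : w.isEmpty
    · rw [List.isEmpty_iff.mp hw]
      simp [pvGood_nil]
    · have hw' : w.isEmpty = false := by simp_all
      by_cases hg : pvGood w = true <;> simp [hw', hg, List.filter_cons]
  | cons c rest ih =>
    simp only [List.foldl_cons]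
    rw [show pvToks (c :: rest) w = if pvPred c then pvToks rest (w ++ [c])
          else (if w.isEmpty then [] else [w]) ++ pvToks rest [] from rfl]
    by_cases hp : pvPred c = true
    · rw [pvStep_pred _ _ hp, if_pos hp]
      exact ih pal (w ++ [c])
    · rw [if_neg hp, pvStep_notpred _ _ (by simpa using hp)]
      by_cases hg : pvGood w = true
      · rw [if_pos hg]
        have hw' : w.isEmpty = false := by
          cases w with
          | nil => simp [pvGood_nil] at hg
          | cons a l => rfl
        rw [if_neg (show ¬(w.isEmpty = true) by simp [hw'])]
        simpa [List.filter_cons, hg, List.append_assoc] using ih (pal ++ [pvFin w]) []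
      · rw [if_neg hg]
        by_cases hw : w.isEmpty
        · rw [List.isEmpty_iff.mp hw]
          simpa using ih pal []
        · rw [if_neg (show ¬(w.isEmpty = true) by simp_all)]
          simpa [List.filter_cons, hg] using ih pal []

lemma pvPred_not_space (c : Char) (h : pvPred c = true) : PySem.Chars.isspace c = false := by
  simp only [pvPred, PySem.Chars.isalpha, PySem.Chars.isupper, PySem.Chars.islower,
    PySem.Chars.isdigit, Bool.or_eq_true, Bool.and_eq_true, decide_eq_true_eq, Char.le_def,
    UInt32.le_iff_toNat_le] at h
  unfold PySem.Chars.isspace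
  simp only [Bool.or_eq_false_iff, Bool.and_eq_false_iff, decide_eq_false_iff_not, Char.toNat]
  norm_num [show ('A').val.toNat = 65 from rfl, show ('Z').val.toNat = 90 from rfl,
    show ('a').val.toNat = 97 from rfl, show ('z').val.toNat = 122 from rfl,
    show ('0').val.toNat = 48 from rfl, show ('9').val.toNat = 57 from rfl] at h ⊢
  omega

lemma pvB (cs : List Char) (rcur : List Char) (acc : List (List Char)) :
    PySem.Chars.split₀.go (cs.map (fun c => if pvPred c then c else ' ')) rcur acc
      = acc.reverse ++ pvToks cs rcur.reverse := by
  induction cs generalizing rcur acc with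
  | nil =>
    rw [show pvToks [] rcur.reverse = if rcur.reverse.isEmpty then [] else [rcur.reverse] from rfl]
    by_cases hw : rcur.isEmpty
    · rw [List.isEmpty_iff.mp hw]
      simp [PySem.Chars.split₀.go]
    · rw [List.map_nil, PySem.Chars.split₀.go, if_neg (by simp [hw]), if_neg (by simp_all)]
      simp
  | cons c rest ih =>
    rw [show pvToks (c :: rest) rcur.reverse = if pvPred c then pvToks rest (rcur.reverse ++ [c])
          else (if rcur.reverse.isEmpty then [] else [rcur.reverse]) ++ pvToks rest [] from rfl]
    simp only [List.map_cons]
    by_cases hp : pvPred c = true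
    · rw [if_pos hp, if_pos hp,
        show PySem.Chars.split₀.go (c :: rest.map (fun c => if pvPred c then c else ' ')) rcur acc
          = PySem.Chars.split₀.go (rest.map (fun c => if pvPred c then c else ' ')) (c :: rcur) acc by
            rw [PySem.Chars.split₀.go, if_neg (by simp [pvPred_not_space c hp])]]
      simpa using ih (c :: rcur) acc
    · rw [if_neg (by simp [hp]), if_neg (by simp [hp])]
      by_cases hw : rcur.isEmpty
      · rw [show PySem.Chars.split₀.go (' ' :: rest.map (fun c => if pvPred c then c else ' ')) rcur acc
            = PySem.Chars.split₀.go (rest.map (fun c => if pvPred c then c else ' ')) [] acc by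
              rw [PySem.Chars.split₀.go, if_pos (by decide), if_pos (by simp_all)]]
        rw [if_pos (by simp_all)]
        simpa using ih [] acc
      · rw [show PySem.Chars.split₀.go (' ' :: rest.map (fun c => if pvPred c then c else ' ')) rcur acc
            = PySem.Chars.split₀.go (rest.map (fun c => if pvPred c then c else ' ')) [] (rcur.reverse :: acc) by
              rw [PySem.Chars.split₀.go, if_pos (by decide), if_neg (by simp_all)]]
        rw [if_neg (by simp_all)]
        simp [ih [] (rcur.reverse :: acc)]

lemma pvAlt_eq (texto : String) :
    encontrar_palavras_alt texto = ((pvToks texto.toList []).filter pvGood).map pvFin := by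
  unfold encontrar_palavras_alt
  simp only [PySem.Str.split₀, String.toList_ofList]
  rw [show (texto.toList.map fun c => if PySem.Chars.isalpha c || PySem.Chars.isdigit c then c else ' ')
        = texto.toList.map (fun c => if pvPred c then c else ' ') by simp [pvPred]]
  rw [PySem.Chars.split₀, pvB texto.toList [] []]
  simp only [List.reverse_nil, List.nil_append, List.filter_map, List.map_map]
  congr 1
  · funext w
    simp [Function.comp, PySem.Str.lower, pvFin]
  · congr 1
    funext w
    simp [Function.comp, PySem.Str.len, PySem.Str.strIsdigit, pvGood]

-- ===== VERDICT (by name: the statement is the Claim_ definition above) =====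
theorem encontrar_palavras_spec : Claim_equal_encontrar_palavras := by
  intro texto _
  show encontrar_palavras texto = encontrar_palavras_alt texto
  rw [pvAlt_eq]
  unfold encontrar_palavras
  exact pvA texto.toList [] []
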